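-- pv_equiv track=rewrite | github.com/ViperJuice/Code-Index-MCP | mcp_server/plugins/ruby_plugin/plugin.py | _get_method_visibility
-- ===== SOURCE A (Python) =====
-- def _get_method_visibility(content: str, method_line: int) -> str:
--     """Determine method visibility by looking for private/protected keywords."""
--     lines = content.split('\n')
--     for i in range(method_line - 2, -1, -1):  # Look backwards from method
--         line = lines[i].strip()
--         if line == 'private':
--             return 'private'
--         elif line == 'protected':
--             return 'protected'
--         elif line.startswith('def ') or line.startswith('class ') or line.startswith('module '):
--             break
--     return 'public'
-- ===== SOURCE B (Python) =====
-- def _get_method_visibility(content: str, method_line: int) -> str: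
--     """Filter-and-last: collect the visibility keywords and block boundaries among
--     the stripped lines before the method; the last such event decides."""
--     lines = content.split('\n')[:max(method_line - 1, 0)]
--     events = [s for s in (l.strip() for l in lines)
--               if s in ('private', 'protected')
--               or s.startswith(('def ', 'class ', 'module '))]
--     if not events or events[-1].startswith(('def ', 'class ', 'module ')):
--         return 'public'
--     return events[-1]
-- ===== Notes on version B (the rewrite author's own statement) =====
-- stated objective: alternative
-- what changed: Replaced the backward early-return scan by a filter-then-last pipeline: slice the lines before the method, keep only visibility keywords and def/class/module boundaries, and decide from the last collected event (boundary or none -> public).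
import Mathlib
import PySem

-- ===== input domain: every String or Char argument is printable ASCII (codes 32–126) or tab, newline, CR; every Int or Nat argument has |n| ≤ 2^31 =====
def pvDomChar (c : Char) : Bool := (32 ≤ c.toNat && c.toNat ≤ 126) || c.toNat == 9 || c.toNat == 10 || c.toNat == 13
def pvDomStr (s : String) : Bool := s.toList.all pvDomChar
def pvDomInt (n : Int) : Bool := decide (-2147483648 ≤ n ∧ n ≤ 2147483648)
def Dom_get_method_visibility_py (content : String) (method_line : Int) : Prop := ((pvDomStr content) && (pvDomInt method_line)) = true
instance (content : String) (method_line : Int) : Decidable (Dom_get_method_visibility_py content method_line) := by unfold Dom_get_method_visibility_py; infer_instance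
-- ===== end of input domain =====

-- B replaces A's backward scan with early returns by a filter-then-last pipeline over the
-- sliced prefix of lines; same asymptotic cost, different decomposition.

-- ===== PORT A =====
-- backward for-loop with early returns, as structural recursion over the countdown range
def pvALoop (lines : List String) : List Int → String
  | [] => "public"
  | i :: rest =>
    let line := PySem.Str.strip ((PySem.List.pyGet? lines i).getD "")
    if line = "private" then "private"
    else if line = "protected" then "protected"
    else if PySem.Str.startswith line "def " || PySem.Str.startswith line "class "
         || PySem.Str.startswith line "module " then "public"   -- break, then return 'public'
    else pvALoop lines rest

def get_method_visibility_py (content : String) (method_line : Int) : String :=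
  let lines := (PySem.Str.split? content "\n").getD []
  pvALoop lines (PySem.List.pyRange (method_line - 2) (-1) (-1))

-- ===== PORT B =====
def pvBoundary (s : String) : Bool :=
  PySem.Str.startswith s "def " || PySem.Str.startswith s "class " || PySem.Str.startswith s "module "

def pvRelevant (s : String) : Bool := s == "private" || s == "protected" || pvBoundary s

def get_method_visibility_py_alt (content : String) (method_line : Int) : String :=
  let lines := PySem.List.slice ((PySem.Str.split? content "\n").getD []) none (some (max (method_line - 1) 0))
  let events := (lines.map PySem.Str.strip).filter pvRelevant
  if events = [] ∨ pvBoundary (PySem.List.pyGetD events (-1) "") then "public"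
  else PySem.List.pyGetD events (-1) ""

-- ===== PRECONDITION & SPEC =====
-- Pre_ excludes exactly the inputs where Python A raises IndexError: method_line - 2 beyond the
-- last line index; both ports are claimed only where A returns.
def Pre_get_method_visibility_py (content : String) (method_line : Int) : Prop :=
  method_line - 1 ≤ ((PySem.Str.split? content "\n").getD []).length
instance (content : String) (method_line : Int) : Decidable (Pre_get_method_visibility_py content method_line) := by unfold Pre_get_method_visibility_py; infer_instance
def pvWitness_get_method_visibility_py : String × Int := ("private\ndef foo", 2)
def Spec_get_method_visibility_py (content : String) (method_line : Int) (out : String) : Prop := out = get_method_visibility_py_alt content method_line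
instance (content : String) (method_line : Int) (out : String) : Decidable (Spec_get_method_visibility_py content method_line out) := by unfold Spec_get_method_visibility_py; infer_instance

-- ===== CLAIM (what is proved, stated in full; the proofs are below) =====
def Claim_equal_get_method_visibility_py : Prop := ∀ (content : String) (method_line : Int), Dom_get_method_visibility_py content method_line → Pre_get_method_visibility_py content method_line → Spec_get_method_visibility_py content method_line (get_method_visibility_py content method_line)

-- ===== LEMMAS AND PROOFS =====

-- proof-side accumulator step over already-stripped lines
def pvStep (vis s : String) : String :=
  if s = "private" ∨ s = "protected" then s
  else if pvBoundary s then "public"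
  else vis

-- A's backward early-return scan equals a forward fold of pvStep over the mapped, reversed range
theorem pv_foldl_reverse_eq_aLoop (lines : List String) (r : List Int) :
    ((r.map (fun i => PySem.Str.strip ((PySem.List.pyGet? lines i).getD ""))).reverse).foldl
      pvStep "public" = pvALoop lines r := by
  induction r with
  | nil => rfl
  | cons i rest ih =>
    rw [List.map_cons, List.reverse_cons, List.foldl_append, ih]
    simp only [List.foldl_cons, List.foldl_nil, pvALoop, pvStep, pvBoundary]
    split_ifs with h1 h2 h3 <;> simp_all

-- a fold of pvStep is decided by the last relevant element
theorem pv_foldl_step_eq_last (S : List String) (init : String) :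
    S.foldl pvStep init =
      (match (S.filter pvRelevant).getLast? with
       | none => init
       | some s => if pvBoundary s then "public" else s) := by
  induction S using List.reverseRecOn with
  | nil => rfl
  | append_singleton xs x ih =>
    rw [List.foldl_append, ih, List.foldl_cons, List.foldl_nil, List.filter_append]
    by_cases hr : pvRelevant x = true
    · have hx : List.filter pvRelevant [x] = [x] := by simp [hr]
      rw [hx, List.getLast?_concat]
      have hcases := hr
      simp only [pvRelevant, Bool.or_eq_true, beq_iff_eq] at hcases
      rcases hcases with (h | h) | h
      · subst h; simp only [pvStep]; simp; decide
      · subst h; simp only [pvStep]; simp; decide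
      · have h1 : x ≠ "private" ∧ x ≠ "protected" := by
          constructor <;> rintro rfl <;> exact absurd h (by decide)
        simp [pvStep, h1.1, h1.2, h]
    · have hx : List.filter pvRelevant [x] = ([] : List String) := by simp [hr]
      rw [hx, List.append_nil]
      simp only [pvRelevant, Bool.or_eq_true, beq_iff_eq] at hr
      push_neg at hr
      simp [pvStep, hr.1.1, hr.1.2, hr.2]

-- the prefix of lines read through pyGet? over range(0,k) is List.take k
theorem pv_map_pyGet_take (xs : List String) (k : Nat) (hk : k ≤ xs.length) :
    (PySem.List.pyRange 0 (k : Int) 1).map (fun i => (PySem.List.pyGet? xs i).getD "") = xs.take k := by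
  apply List.ext_getElem
  · simp [PySem.List.length_pyRange_one]; omega
  · intro n h1 h2
    simp only [List.getElem_map, PySem.List.getElem_pyRange_one, zero_add]
    have hn : n < xs.length := by
      simp [PySem.List.length_pyRange_one] at h1; omega
    simp [PySem.List.pyGet?_natCast, List.getElem?_eq_getElem hn, List.getElem_take]

-- ===== VERDICT (by name: the statement is the Claim_ definition above) =====
theorem get_method_visibility_py_spec : Claim_equal_get_method_visibility_py := by
  intro content method_line _ hpre
  unfold Spec_get_method_visibility_py get_method_visibility_py get_method_visibility_py_alt
  unfold Pre_get_method_visibility_py at hpre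
  set lines := (PySem.Str.split? content "\n").getD [] with hlines
  have hrev := PySem.List.pyRange_neg_one_eq_reverse (method_line - 2) (-1)
  rw [show (-1 : Int) + 1 = 0 by ring, show method_line - 2 + 1 = method_line - 1 by ring] at hrev
  rw [hrev, ← pv_foldl_reverse_eq_aLoop, List.map_reverse, List.reverse_reverse,
    pv_foldl_step_eq_last]
  by_cases hpos : 0 < method_line - 1
  · have hmax : max (method_line - 1) 0 = method_line - 1 := by omega
    have hk : (method_line - 1) = (((method_line - 1).toNat : Nat) : Int) := by omega
    have hkle : (method_line - 1).toNat ≤ lines.length := by omega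
    have hcomp : (PySem.List.pyRange 0 (method_line - 1) 1).map
        (fun i => PySem.Str.strip ((PySem.List.pyGet? lines i).getD "")) =
        ((PySem.List.pyRange 0 (method_line - 1) 1).map
          (fun i => (PySem.List.pyGet? lines i).getD "")).map PySem.Str.strip := by
      rw [List.map_map]; rfl
    rw [hmax, PySem.List.slice_to lines hpos.le, hcomp, hk, pv_map_pyGet_take lines _ hkle]
    rw [Int.toNat_natCast]
    simp only []
    set E := ((lines.take (method_line - 1).toNat).map PySem.Str.strip).filter pvRelevant with hE
    match hL : E.getLast? with
    | none =>
      have h0 : E = [] := List.getLast?_eq_none_iff.mp hL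
      rw [h0]
      simp
    | some s =>
      have hne : E ≠ [] := by
        intro h; rw [h] at hL; simp at hL
      rw [PySem.List.pyGetD_neg_one E "" hne]
      have hgl : E.getLast hne = s := by
        have := List.getLast?_eq_getLast hne
        rw [hL] at this; exact (Option.some_inj.mp this.symm)
      rw [hgl]
      have h1 : (E = []) = False := eq_false hne
      simp only [h1, false_or]
  · have hempty : PySem.List.pyRange 0 (method_line - 1) 1 = [] :=
      PySem.List.pyRange_one_eq_nil (by omega)
    have hmax : max (method_line - 1) 0 = 0 := by omega
    rw [hempty, hmax, PySem.List.slice_to lines (by omega)]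
    simp
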